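-- pv_equiv track=rewrite | github.com/nicsuzor/academicOps | aops-core/hooks/policy_enforcer.py | count_prose_lines
-- ===== SOURCE A (Python) =====
-- def count_prose_lines(content: str) -> int:
--     """Count lines excluding mermaid/code blocks."""
--     lines = content.split("\n")
--     count = 0
--     in_code_block = False
--
--     for line in lines:
--         # Toggle on code fence (``` or ```mermaid, etc.)
--         if line.strip().startswith("```"):
--             in_code_block = not in_code_block
--             continue
--         if not in_code_block:
--             count += 1
--
--     return count
-- ===== SOURCE B (Python) =====
-- def count_prose_lines(content: str) -> int:
--     """Count lines excluding mermaid/code blocks.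
--
--     Partition the lines into segments separated by fence lines, then sum the
--     lengths of the even-indexed segments (the prose regions).
--     """
--     segments = [[]]
--     for line in content.split("\n"):
--         if line.strip().startswith("```"):
--             segments.append([])
--         else:
--             segments[-1].append(line)
--     return sum(len(seg) for i, seg in enumerate(segments) if i % 2 == 0)
-- ===== Notes on version B (the rewrite author's own statement) =====
-- stated objective: alternative
-- what changed: Replaces the per-line in_code_block toggle and counter with a partition-then-aggregate shape: split the lines into fence-delimited segments in one pass, then sum the lengths of the even-indexed (prose) segments.
import Mathlib
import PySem

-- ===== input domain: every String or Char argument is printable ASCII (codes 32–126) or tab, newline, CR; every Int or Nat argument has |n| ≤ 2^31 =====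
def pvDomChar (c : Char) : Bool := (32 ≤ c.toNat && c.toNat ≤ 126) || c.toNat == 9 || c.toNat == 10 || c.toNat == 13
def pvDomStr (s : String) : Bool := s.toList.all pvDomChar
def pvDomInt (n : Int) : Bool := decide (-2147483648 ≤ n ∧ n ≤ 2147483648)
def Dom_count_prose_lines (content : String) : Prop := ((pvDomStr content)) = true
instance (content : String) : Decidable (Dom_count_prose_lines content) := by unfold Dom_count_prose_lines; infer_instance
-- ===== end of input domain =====

-- B replaces A's per-line toggle+counter with a partition into fence-delimited
-- segments followed by summing the even-indexed (prose) segment lengths.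

-- ===== PORT A =====
-- content.split("\n") with the non-empty separator "\n": PySem.Str.split? is none only
-- for an empty separator, so .getD [] is exact here.
def count_prose_lines (content : String) : Int :=
  let lines := (PySem.Str.split? content "\n").getD []
  (lines.foldl (fun (st : Int × Bool) line =>
      if PySem.Str.startswith (PySem.Str.strip line) "```" then (st.1, !st.2)
      else if !st.2 then (st.1 + 1, st.2) else st)
    (0, false)).1

-- ===== PORT B =====
-- segments are kept in reverse order (each segment also reversed) by the fold;
-- reversing at the end recovers Source B's append-at-the-end list (lengths unaffected).
def count_prose_lines_alt (content : String) : Int :=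
  let lines := (PySem.Str.split? content "\n").getD []
  let rsegs := lines.foldl (fun (segs : List (List String)) line =>
      if PySem.Str.startswith (PySem.Str.strip line) "```" then [] :: segs
      else match segs with
        | cur :: rest => (line :: cur) :: rest
        | [] => [[line]])
    [[]]
  let segments := rsegs.reverse
  (PySem.List.enumerate segments).foldl
    (fun acc p => if PySem.Int.mod p.1 2 == 0 then acc + (p.2.length : Int) else acc) 0

-- ===== PRECONDITION & SPEC =====
def Spec_count_prose_lines (content : String) (out : Int) : Prop := out = count_prose_lines_alt content
instance (content : String) (out : Int) : Decidable (Spec_count_prose_lines content out) := by unfold Spec_count_prose_lines; infer_instance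

-- ===== CLAIM (what is proved, stated in full; the proofs are below) =====
def Claim_equal_count_prose_lines : Prop := ∀ (content : String), Dom_count_prose_lines content → Spec_count_prose_lines content (count_prose_lines content)

-- ===== LEMMAS AND PROOFS =====

-- prose-line count of `ls` starting with in_code_block state `b`, for an abstract fence test
def pvF (fence : String → Bool) (ls : List String) (b : Bool) : Int :=
  match ls with
  | [] => 0
  | l :: ls => if fence l then pvF fence ls (!b) else (if b then 0 else 1) + pvF fence ls b

-- alternating segment-length sum; flag true = current position counts
def pvES (b : Bool) (segs : List (List String)) : Int :=
  match segs with
  | [] => 0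
  | s :: rest => (if b then (s.length : Int) else 0) + pvES (!b) rest

theorem pvF_A (fence : String → Bool) (ls : List String) : ∀ (c : Int) (b : Bool),
    (ls.foldl (fun (st : Int × Bool) line =>
      if fence line then (st.1, !st.2)
      else if !st.2 then (st.1 + 1, st.2) else st) (c, b)).1 = c + pvF fence ls b := by
  induction ls with
  | nil => intro c b; simp [pvF]
  | cons l ls ih =>
    intro c b
    simp only [List.foldl_cons]
    by_cases h : fence l = true
    · rw [if_pos h, ih]
      simp only [pvF]
      rw [if_pos h]
    · rw [if_neg h]
      simp only [pvF]
      rw [if_neg h]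
      cases b
      · rw [if_pos (show (!false) = true from rfl), ih, if_neg (show ¬(false = true) by simp)]
        ring
      · rw [if_neg (show ¬((!true) = true) by simp), ih, if_pos (show true = true from rfl)]
        ring

-- appending one segment at the end adds its length iff the new position has flag `b`
theorem pvES_snoc (xs : List (List String)) (s : List String) : ∀ (b : Bool),
    pvES b (xs ++ [s]) = pvES b xs
      + (if b = decide (xs.length % 2 = 0) then (s.length : Int) else 0) := by
  induction xs with
  | nil => intro b; cases b <;> simp [pvES]
  | cons x xs ih =>
    intro b
    have hflag : ((!b) = decide (xs.length % 2 = 0)) ↔ (b = decide ((x :: xs).length % 2 = 0)) := by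
      simp only [List.length_cons]
      rcases Nat.mod_two_eq_zero_or_one xs.length with hp | hp
      · have h1 : (xs.length + 1) % 2 = 1 := by omega
        cases b <;> simp [hp, h1]
      · have h1 : (xs.length + 1) % 2 = 0 := by omega
        cases b <;> simp [hp, h1]
    simp only [List.cons_append, pvES, ih]
    rw [if_congr hflag rfl rfl]
    ring

theorem pvES_enum (segs : List (List String)) : ∀ (s a : Int),
    ((PySem.List.enumerate segs s).foldl
      (fun acc p => if PySem.Int.mod p.1 2 == 0 then acc + (p.2.length : Int) else acc) a)
    = a + pvES (PySem.Int.mod s 2 == 0) segs := by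
  induction segs with
  | nil => intro s a; simp [PySem.List.enumerate_nil, pvES]
  | cons x xs ih =>
    intro s a
    have hm : (PySem.Int.mod (s + 1) 2 == 0) = !(PySem.Int.mod s 2 == 0) := by
      rw [PySem.Int.mod_eq_emod_of_pos (by norm_num), PySem.Int.mod_eq_emod_of_pos (by norm_num)]
      rcases Int.emod_two_eq_zero_or_one s with h | h
      · have h1 : (s + 1) % 2 = 1 := by omega
        simp [h, h1]
      · have h1 : (s + 1) % 2 = 0 := by omega
        simp [h, h1]
    rw [PySem.List.enumerate_cons]
    simp only [List.foldl_cons]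
    rw [ih, hm]
    simp only [pvES]
    split_ifs <;> ring

theorem pvB_main (fence : String → Bool) (ls : List String) :
    ∀ (rsegs : List (List String)), rsegs ≠ [] →
    pvES true ((ls.foldl (fun (segs : List (List String)) line =>
      if fence line then [] :: segs
      else match segs with
        | cur :: rest => (line :: cur) :: rest
        | [] => [[line]]) rsegs).reverse)
    = pvES true rsegs.reverse + pvF fence ls (decide (rsegs.length % 2 = 0)) := by
  induction ls with
  | nil => intro rsegs _; simp [pvF]
  | cons l ls ih =>
    intro rsegs hne
    simp only [List.foldl_cons]
    by_cases h : fence l = true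
    · rw [if_pos h, ih ([] :: rsegs) (by simp)]
      have e1 : pvES true (([] : List String) :: rsegs).reverse = pvES true rsegs.reverse := by
        rw [List.reverse_cons, pvES_snoc]
        split_ifs <;> simp
      have e2 : (decide ((([] : List String) :: rsegs).length % 2 = 0))
          = !(decide (rsegs.length % 2 = 0)) := by
        simp only [List.length_cons]
        rcases Nat.mod_two_eq_zero_or_one rsegs.length with hp | hp
        · have h1 : (rsegs.length + 1) % 2 = 1 := by omega
          simp [hp, h1]
        · have h1 : (rsegs.length + 1) % 2 = 0 := by omega
          simp [hp, h1]
      rw [e1, e2]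
      simp only [pvF]
      rw [if_pos h]
    · obtain ⟨cur, rest, rfl⟩ : ∃ c r, rsegs = c :: r := by
        cases rsegs with
        | nil => exact absurd rfl hne
        | cons c r => exact ⟨c, r, rfl⟩
      rw [if_neg h, ih ((l :: cur) :: rest) (by simp)]
      have hlen : ((l :: cur) :: rest).length = (cur :: rest).length := by simp
      rw [hlen]
      have e1 : pvES true ((l :: cur) :: rest).reverse
          = pvES true (cur :: rest).reverse
            + (if (cur :: rest).length % 2 = 0 then 0 else 1) := by
        rw [List.reverse_cons, List.reverse_cons, pvES_snoc, pvES_snoc]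
        simp only [List.length_reverse, List.length_cons]
        rcases Nat.mod_two_eq_zero_or_one rest.length with hp | hp
        · have h1 : ¬((rest.length + 1) % 2 = 0) := by omega
          simp [hp, h1]
          ring
        · have h1 : (rest.length + 1) % 2 = 0 := by omega
          simp [hp, h1]
      rw [e1]
      simp only [pvF]
      rw [if_neg h]
      have hif : (if (decide ((cur :: rest).length % 2 = 0)) = true then (0 : Int) else 1)
          = (if (cur :: rest).length % 2 = 0 then 0 else 1) := by
        by_cases hD : (cur :: rest).length % 2 = 0 <;> simp [hD]
      rw [hif]
      ring

-- ===== VERDICT (by name: the statement is the Claim_ definition above) =====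
theorem count_prose_lines_spec : Claim_equal_count_prose_lines := by
  intro content _
  unfold Spec_count_prose_lines
  simp only [count_prose_lines, count_prose_lines_alt]
  rw [pvF_A (fun line => PySem.Str.startswith (PySem.Str.strip line) "```"),
      pvES_enum]
  have h0 : (PySem.Int.mod 0 2 == 0) = true := by decide
  rw [h0, pvB_main (fun line => PySem.Str.startswith (PySem.Str.strip line) "```") _ [[]] (by simp)]
  simp [pvES]
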